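-- pv_equiv track=rewrite | github.com/dream-create-do/dede-builder | style_templates.py | _azure_clo_cards
-- ===== SOURCE A (Python) =====
-- def _esc(text):
--     """HTML-escape text."""
--     if not text:
--         return ''
--     return (str(text)
--             .replace('&', '&amp;')
--             .replace('<', '&lt;')
--             .replace('>', '&gt;')
--             .replace('"', '&quot;'))
--
-- def _azure_clo_cards(clos):
--     """Render CLOs as Azure Modern cards in a 2-column grid."""
--     if not clos:
--         return ''
--
--     cards = []
--     for c in clos:
--         verb = _esc(c.get('blooms', 'Learn'))
--         text = _esc(c.get('text', ''))
--         cid = _esc(c.get('id', ''))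
--         cards.append(f'''
-- <div class="d-flex flex-row justify-content-center align-items-center text-center col">
-- <div class="dp-column-liner w-100 dp-padding-direction-tblr" style="background-color: #ffffff; color: #000000; border-radius: 10px; padding-left: 10px; padding-right: 10px;">
-- <h4><strong><span style="font-size: 14pt;">{verb}</span></strong></h4>
-- <p><span style="font-size: 10pt;">{text} ({cid})</span></p>
-- </div>
-- </div>''')
--
--     # Arrange in rows of 2
--     rows = []
--     for i in range(0, len(cards), 2):
--         pair = ''.join(cards[i:i+2])
--         rows.append(f'''
-- <div class="dp-column-container container-fluid dp-padding-direction-tblr" style="padding-left: 30px; padding-right: 30px; padding-top: 15px;">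
-- <div class="row">{pair}</div>
-- </div>''')
--
--     return ''.join(rows)
-- ===== SOURCE B (Python) =====
-- def _azure_clo_cards(clos):
--     """Render CLOs as Azure Modern cards in a 2-column grid (single pairwise pass)."""
--
--     def esc(t):
--         return (str(t)
--                 .replace('&', '&amp;')
--                 .replace('<', '&lt;')
--                 .replace('>', '&gt;')
--                 .replace('"', '&quot;')) if t else ''
--
--     def card(c):
--         return (
--             '\n<div class="d-flex flex-row justify-content-center align-items-center text-center col">\n'
--             '<div class="dp-column-liner w-100 dp-padding-direction-tblr" style="background-color: #ffffff; color: #000000; border-radius: 10px; padding-left: 10px; padding-right: 10px;">\n'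
--             f'<h4><strong><span style="font-size: 14pt;">{esc(c.get("blooms", "Learn"))}</span></strong></h4>\n'
--             f'<p><span style="font-size: 10pt;">{esc(c.get("text", ""))} ({esc(c.get("id", ""))})</span></p>\n'
--             '</div>\n</div>'
--         )
--
--     ROW_OPEN = ('\n<div class="dp-column-container container-fluid dp-padding-direction-tblr" '
--                 'style="padding-left: 30px; padding-right: 30px; padding-top: 15px;">\n<div class="row">')
--     ROW_CLOSE = '</div>\n</div>'
--
--     def go(rest):
--         if not rest:
--             return ''
--         if len(rest) == 1:
--             return ROW_OPEN + card(rest[0]) + ROW_CLOSE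
--         return ROW_OPEN + card(rest[0]) + card(rest[1]) + ROW_CLOSE + go(rest[2:])
--
--     return go(clos)
-- ===== Notes on version B (the rewrite author's own statement) =====
-- stated objective: simpler
-- what changed: Replaced A's two-pass design (build a full card list, then a second range/slice loop chunking it into rows) with a single direct recursion over the CLO list two at a time that renders and wraps each pair of cards immediately.
import Mathlib
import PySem

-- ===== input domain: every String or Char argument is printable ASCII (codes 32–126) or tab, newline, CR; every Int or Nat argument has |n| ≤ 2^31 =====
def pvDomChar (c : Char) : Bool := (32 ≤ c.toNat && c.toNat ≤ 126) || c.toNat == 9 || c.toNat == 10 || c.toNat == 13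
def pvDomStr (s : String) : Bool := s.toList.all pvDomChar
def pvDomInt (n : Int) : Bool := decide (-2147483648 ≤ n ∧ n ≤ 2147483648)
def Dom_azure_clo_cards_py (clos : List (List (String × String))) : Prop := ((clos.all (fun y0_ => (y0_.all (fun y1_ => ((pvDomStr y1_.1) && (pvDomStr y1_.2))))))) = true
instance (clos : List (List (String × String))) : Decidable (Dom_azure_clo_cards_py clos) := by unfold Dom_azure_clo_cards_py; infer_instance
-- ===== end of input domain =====

-- B replaces A's two passes (build all cards, then chunk the card list into rows of 2)
-- by one pairwise recursion over the CLO list that emits each wrapped row directly (objective: simpler).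

-- shared helpers (both Pythons contain the same escape logic and dict lookups, and emit byte-identical HTML templates)
-- dict.get(k, dflt) on the association list: first match
def pvGetD (c : List (String × String)) (k dflt : String) : String :=
  match c.find? (fun p => p.1 == k) with
  | some p => p.2
  | none => dflt

-- _esc: 'if not text: return '' ' then the four replaces
def pvEsc (s : String) : String :=
  if s = "" then ""
  else PySem.Str.replace (PySem.Str.replace (PySem.Str.replace (PySem.Str.replace s "&" "&amp;") "<" "&lt;") ">" "&gt;") "\"" "&quot;"

-- the f-string template segments (identical in A and B)
def pvCardPre : String := "\n<div class=\"d-flex flex-row justify-content-center align-items-center text-center col\">\n<div class=\"dp-column-liner w-100 dp-padding-direction-tblr\" style=\"background-color: #ffffff; color: #000000; border-radius: 10px; padding-left: 10px; padding-right: 10px;\">\n<h4><strong><span style=\"font-size: 14pt;\">"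
def pvCardMid : String := "</span></strong></h4>\n<p><span style=\"font-size: 10pt;\">"
def pvCardSuf : String := ")</span></p>\n</div>\n</div>"
def pvRowPre : String := "\n<div class=\"dp-column-container container-fluid dp-padding-direction-tblr\" style=\"padding-left: 30px; padding-right: 30px; padding-top: 15px;\">\n<div class=\"row\">"
def pvRowSuf : String := "</div>\n</div>"

-- ===== PORT A =====
def azure_clo_cards_py (clos : List (List (String × String))) : String :=
  if clos = [] then ""
  else
    -- first pass: cards.append(f'...')
    let cards := clos.foldl (fun acc c =>
      let verb := pvEsc (pvGetD c "blooms" "Learn")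
      let text := pvEsc (pvGetD c "text" "")
      let cid := pvEsc (pvGetD c "id" "")
      acc ++ [pvCardPre ++ verb ++ pvCardMid ++ text ++ " (" ++ cid ++ pvCardSuf]) []
    -- second pass: for i in range(0, len(cards), 2): rows.append(f'...{''.join(cards[i:i+2])}...')
    let rows := (PySem.List.pyRange 0 (cards.length : Int) 2).foldl (fun acc i =>
      acc ++ [pvRowPre ++ PySem.Str.join "" (PySem.List.slice cards (some i) (some (i + 2))) ++ pvRowSuf]) []
    PySem.Str.join "" rows

-- ===== PORT B =====
-- card(c) of Source B
def pvCard (c : List (String × String)) : String :=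
  pvCardPre ++ pvEsc (pvGetD c "blooms" "Learn") ++ pvCardMid ++ pvEsc (pvGetD c "text" "") ++ " (" ++ pvEsc (pvGetD c "id" "") ++ pvCardSuf

-- go(rest) of Source B: one row per one or two leading CLOs, then recurse on rest[2:]
def pvGo : List (List (String × String)) → String
  | [] => ""
  | [c] => pvRowPre ++ pvCard c ++ pvRowSuf
  | c1 :: c2 :: tl => pvRowPre ++ pvCard c1 ++ pvCard c2 ++ pvRowSuf ++ pvGo tl

def azure_clo_cards_py_alt (clos : List (List (String × String))) : String :=
  pvGo clos

-- ===== PRECONDITION & SPEC =====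
def Spec_azure_clo_cards_py (clos : List (List (String × String))) (out : String) : Prop := out = azure_clo_cards_py_alt clos
instance (clos : List (List (String × String))) (out : String) : Decidable (Spec_azure_clo_cards_py clos out) := by unfold Spec_azure_clo_cards_py; infer_instance

-- ===== CLAIM (what is proved, stated in full; the proofs are below) =====
def Claim_equal_azure_clo_cards_py : Prop := ∀ (clos : List (List (String × String))), Dom_azure_clo_cards_py clos → Spec_azure_clo_cards_py clos (azure_clo_cards_py clos)

-- ===== LEMMAS AND PROOFS =====

-- proof-only: B's row recursion, stated on an already-rendered list of card strings
def pvGoS : List String → String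
  | [] => ""
  | [x] => pvRowPre ++ x ++ pvRowSuf
  | x :: y :: tl => pvRowPre ++ x ++ y ++ pvRowSuf ++ pvGoS tl

theorem pvSjoin_nil : PySem.Str.join "" [] = "" := by
  apply String.toList_inj.mp
  simp [PySem.Str.toList_join, PySem.Chars.join_nil]

theorem pvSjoin_cons (x : String) (l : List String) :
    PySem.Str.join "" (x :: l) = x ++ PySem.Str.join "" l := by
  apply String.toList_inj.mp
  cases l with
  | nil => simp [PySem.Str.toList_join, PySem.Chars.join_singleton, PySem.Chars.join_nil,
      String.toList_append]
  | cons y t => simp [PySem.Str.toList_join, String.toList_append, PySem.Chars.join_cons_cons]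

-- B's recursion over CLOs = the same recursion over the rendered card list
theorem pvGo_eq : ∀ (clos : List (List (String × String))), pvGo clos = pvGoS (clos.map pvCard)
  | [] => rfl
  | [_] => rfl
  | c1 :: c2 :: tl => by
    simp only [pvGo, pvGoS, List.map_cons]
    rw [pvGo_eq tl]

-- the Nat-range form of A's chunking loop equals the pairwise recursion
theorem pvRangeRows : ∀ (cards : List String),
    PySem.Str.join "" ((List.range ((cards.length + 1) / 2)).map
      (fun k => pvRowPre ++ PySem.Str.join "" ((cards.drop (2 * k)).take 2) ++ pvRowSuf))
    = pvGoS cards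
  | [] => by simp [pvGoS, pvSjoin_nil]
  | [x] => by
    simp [pvGoS, List.range_succ, pvSjoin_cons, pvSjoin_nil]
  | x :: y :: tl => by
    have IH := pvRangeRows tl
    have hlen : ((x :: y :: tl).length + 1) / 2 = (tl.length + 1) / 2 + 1 := by
      simp [List.length_cons]; omega
    rw [hlen, List.range_succ_eq_map, List.map_cons, List.map_map, pvSjoin_cons]
    have hmap : ∀ k : ℕ, (2 * (k + 1)) = (2 * k) + 1 + 1 := by omega
    have : (List.range ((tl.length + 1) / 2)).map
        ((fun k => pvRowPre ++ PySem.Str.join "" (((x :: y :: tl).drop (2 * k)).take 2) ++ pvRowSuf) ∘ Nat.succ)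
        = (List.range ((tl.length + 1) / 2)).map
        (fun k => pvRowPre ++ PySem.Str.join "" ((tl.drop (2 * k)).take 2) ++ pvRowSuf) := by
      refine List.map_congr_left (fun k _ => ?_)
      simp [Function.comp, hmap k, List.drop_succ_cons]
    rw [this, IH]
    simp [pvGoS, pvSjoin_cons, pvSjoin_nil, String.append_empty, String.append_assoc]

-- A's pyRange-with-slice row list is the Nat-range form
theorem pvPyRows (cards : List String) :
    (PySem.List.pyRange 0 (cards.length : Int) 2).map
      (fun i => pvRowPre ++ PySem.Str.join "" (PySem.List.slice cards (some i) (some (i + 2))) ++ pvRowSuf)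
    = (List.range ((cards.length + 1) / 2)).map
      (fun k => pvRowPre ++ PySem.Str.join "" ((cards.drop (2 * k)).take 2) ++ pvRowSuf) := by
  rw [PySem.List.pyRange_of_pos 0 (cards.length : Int) (by norm_num)]
  rcases Nat.eq_zero_or_pos cards.length with h | h
  · simp [h]
  · have hif : (0 : Int) < (cards.length : Int) := by exact_mod_cast h
    rw [if_pos hif]
    have hcount : (((cards.length : Int) - 0 + 2 - 1) / 2).toNat = (cards.length + 1) / 2 := by
      omega
    rw [hcount, List.map_map]
    refine List.map_congr_left (fun k _ => ?_)
    have hs : PySem.List.slice cards (some ((0 : Int) + 2 * (k : Int)))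
        (some ((0 : Int) + 2 * (k : Int) + 2)) = (cards.drop (2 * k)).take 2 := by
      rw [PySem.List.slice_toNat]
      · have h1 : ((0 : Int) + 2 * (k : Int)).toNat = 2 * k := by omega
        have h2 : ((0 : Int) + 2 * (k : Int) + 2).toNat = 2 * k + 2 := by omega
        rw [h1, h2]
        norm_num
      · positivity
      · positivity
    simp only [Function.comp_apply]
    rw [hs]

-- ===== VERDICT (by name: the statement is the Claim_ definition above) =====
theorem azure_clo_cards_py_spec : Claim_equal_azure_clo_cards_py := by
  intro clos _
  show azure_clo_cards_py clos = azure_clo_cards_py_alt clos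
  unfold azure_clo_cards_py azure_clo_cards_py_alt
  rcases eq_or_ne clos [] with h | h
  · subst h; simp [pvGo]
  · rw [if_neg h]
    have hcards : (fun (acc : List String) (c : List (String × String)) =>
        let verb := pvEsc (pvGetD c "blooms" "Learn")
        let text := pvEsc (pvGetD c "text" "")
        let cid := pvEsc (pvGetD c "id" "")
        acc ++ [pvCardPre ++ verb ++ pvCardMid ++ text ++ " (" ++ cid ++ pvCardSuf])
        = (fun acc c => acc ++ [pvCard c]) := rfl
    simp only [hcards, PySem.List.foldl_append_singleton_eq_map, List.nil_append]
    rw [pvPyRows, pvRangeRows]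
    exact (pvGo_eq clos).symm
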